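-- pv_equiv track=rewrite | github.com/Ckevinfl89/whiteboardw9d5 | whiteboard.py | solution
-- ===== SOURCE A (Python) =====
-- def solution(str1, str2):
--     dict = {}
--
--     for letter in str1:
--         if letter not in dict:
--             dict[letter] = 1
--         else:
--             dict[letter] += 1
--
--     for letter in str2:
--         if letter not in dict:
--             return False
--         else:
--             dict[letter] -= 1
--             if dict[letter] < 0:
--                 return False
--
--     return True
-- ===== SOURCE B (Python) =====
-- def solution(str1, str2):
--     a = sorted(str1)
--     b = sorted(str2)
--     i = 0
--     for ch in b:
--         while i < len(a) and a[i] < ch: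
--             i += 1
--         if i == len(a) or a[i] != ch:
--             return False
--         i += 1
--     return True
-- ===== Notes on version B (the rewrite author's own statement) =====
-- stated objective: alternative
-- what changed: Replaces A's hash-count build plus per-character decrement pass with sort-both-strings and a two-pointer merge scan checking sorted(str2) embeds in sorted(str1) as a sublist.
import Mathlib
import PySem

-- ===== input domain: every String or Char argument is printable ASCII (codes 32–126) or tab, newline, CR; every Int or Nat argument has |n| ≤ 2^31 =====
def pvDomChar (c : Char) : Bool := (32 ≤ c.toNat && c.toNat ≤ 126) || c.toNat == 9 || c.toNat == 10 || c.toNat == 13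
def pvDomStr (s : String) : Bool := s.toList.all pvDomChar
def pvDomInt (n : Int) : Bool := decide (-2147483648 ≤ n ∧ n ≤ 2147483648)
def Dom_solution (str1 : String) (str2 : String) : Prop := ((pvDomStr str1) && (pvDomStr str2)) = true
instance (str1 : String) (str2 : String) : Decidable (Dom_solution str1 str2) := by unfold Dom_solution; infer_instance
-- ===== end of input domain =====

-- B replaces A's hash-count-and-decrement pass with sorting both strings and a two-pointer merge scan (alternative algorithm; sorting costs O(n log n)).


-- ===== PORT A =====
-- second loop of A: early 'return False' becomes structural recursion over str2's characters
def solutionGo (d : PySem.Dict Char Int) : List Char → Bool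
  | [] => true
  | c :: rest =>
    if !(d.contains c) then false
    else
      let d' := d.insert c (d.getD c 0 - 1)
      if d'.getD c 0 < 0 then false
      else solutionGo d' rest

def solution (str1 : String) (str2 : String) : Bool :=
  let d := str1.toList.foldl (fun d c =>
    if !(d.contains c) then d.insert c 1 else d.insert c (d.getD c 0 + 1)) PySem.Dict.empty
  solutionGo d str2.toList

-- ===== PORT B =====
-- B's loop over sorted(str2) with pointer i into sorted(str1): the pointer becomes the
-- unconsumed suffix of the first list; the inner 'while a[i] < ch' advance is the first branch.
def scanB : List Char → List Char → Bool
  | _, [] => true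
  | [], _ :: _ => false
  | x :: xs, c :: cs =>
    if x < c then scanB xs (c :: cs)       -- while i < len(a) and a[i] < ch: i += 1
    else if x = c then scanB xs cs         -- matched: i += 1, next ch
    else false                             -- a[i] > ch (or exhausted): return False

def solution_alt (str1 : String) (str2 : String) : Bool :=
  scanB (PySem.List.sorted str1.toList (fun x => x) false)
        (PySem.List.sorted str2.toList (fun x => x) false)

-- ===== PRECONDITION & SPEC =====
def Spec_solution (str1 : String) (str2 : String) (out : Bool) : Prop := out = solution_alt str1 str2
instance (str1 : String) (str2 : String) (out : Bool) : Decidable (Spec_solution str1 str2 out) := by unfold Spec_solution; infer_instance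

-- ===== CLAIM (what is proved, stated in full; the proofs are below) =====
def Claim_equal_solution : Prop := ∀ (str1 : String) (str2 : String), Dom_solution str1 str2 → Spec_solution str1 str2 (solution str1 str2)

-- ===== LEMMAS AND PROOFS =====
-- A's first loop builds exactly Counter(str1): the not-in branch writes 1 = get(ch,0)+1
lemma buildA_eq (l : List Char) :
    l.foldl (fun d c => if !(d.contains c) then d.insert c 1 else d.insert c (d.getD c 0 + 1))
      PySem.Dict.empty = PySem.Dict.counter l := by
  rw [← PySem.Dict.foldl_insert_getD_add_one_eq_counter]
  apply PySem.List.foldl_congr_mem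
  intro acc c _
  by_cases h : acc.contains c = true
  · simp [h]
  · simp only [Bool.not_eq_true] at h
    simp [h, PySem.Dict.getD_of_not_contains acc (0 : Int) h]

-- characterisation of A's decrement loop: it succeeds iff every letter of l is
-- present in d with a stock covering its multiplicity in l
lemma go_eq (l : List Char) : ∀ d : PySem.Dict Char Int,
    solutionGo d l = decide (∀ c ∈ l, d.contains c = true ∧ (l.count c : Int) ≤ d.getD c 0) := by
  induction l with
  | nil => intro d; simp [solutionGo]
  | cons c rest ih =>
    intro d
    simp only [solutionGo]
    by_cases hc : d.contains c = true
    · simp only [hc, Bool.not_true, Bool.false_eq_true, if_false]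
      rw [PySem.Dict.getD_insert_self]
      by_cases hneg : d.getD c 0 - 1 < 0
      · simp only [if_pos hneg]
        symm; simp only [decide_eq_false_iff_not]
        intro h
        have h1 : 1 ≤ ((c :: rest).count c : Int) := by
          have : (c :: rest).count c = rest.count c + 1 := by simp
          push_cast [this]; omega
        have := (h c (by simp)).2
        omega
      · simp only [if_neg hneg, ih]
        simp only [decide_eq_decide]
        constructor
        · intro h x hx
          rcases List.mem_cons.mp hx with hxc | hxr
          · subst hxc
            refine ⟨hc, ?_⟩
            rw [List.count_cons_self]
            by_cases hm : x ∈ rest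
            · have := (h x hm).2
              rw [PySem.Dict.getD_insert_self] at this
              push_cast; omega
            · rw [List.count_eq_zero_of_not_mem hm]; omega
          · by_cases hxc : x = c
            · subst hxc
              refine ⟨hc, ?_⟩
              have := (h x hxr).2
              rw [PySem.Dict.getD_insert_self, List.count_cons_self] at *
              push_cast; omega
            · rcases h x hxr with ⟨h1, h2⟩
              rw [PySem.Dict.contains_insert] at h1
              rw [PySem.Dict.getD_insert_of_ne d _ _ hxc] at h2
              refine ⟨?_, ?_⟩
              · simpa [hxc] using h1
              · have : (c :: rest).count x = rest.count x := by
                  simp [Ne.symm hxc]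
                rwa [this]
        · intro h x hxr
          by_cases hxc : x = c
          · subst hxc
            refine ⟨by rw [PySem.Dict.contains_insert]; simp, ?_⟩
            rw [PySem.Dict.getD_insert_self]
            have := (h x (by simp)).2
            rw [List.count_cons_self] at this
            push_cast at this ⊢; omega
          · rcases h x (List.mem_cons_of_mem c hxr) with ⟨h1, h2⟩
            refine ⟨?_, ?_⟩
            · rw [PySem.Dict.contains_insert, h1, Bool.or_true]
            · rw [PySem.Dict.getD_insert_of_ne d _ _ hxc]
              have : (c :: rest).count x = rest.count x := by
                simp [Ne.symm hxc]
              rwa [this] at h2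
    · simp only [hc]
      simp only [Bool.not_false, if_true]
      symm; simp only [decide_eq_false_iff_not]
      intro h
      exact absurd (h c (by simp)).1 (by simp [hc])

-- the merge scan on two ≤-sorted lists decides the sub-multiset relation
lemma scanB_iff (s : List Char) : ∀ t : List Char,
    s.Pairwise (· ≤ ·) → t.Pairwise (· ≤ ·) → (scanB s t = true ↔ List.Subperm t s) := by
  induction s with
  | nil =>
    intro t _ _
    cases t with
    | nil => simp [scanB]
    | cons c cs =>
      simp only [scanB, Bool.false_eq_true, false_iff]
      intro h
      simpa using h.length_le
  | cons x xs ih =>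
    intro t hs ht
    cases t with
    | nil => simp [scanB]
    | cons c cs =>
      rcases List.pairwise_cons.mp hs with ⟨hxall, hxs⟩
      rcases List.pairwise_cons.mp ht with ⟨hcall, hcs⟩
      by_cases hlt : x < c
      · simp only [scanB, if_pos hlt]
        rw [ih (c :: cs) hxs ht]
        constructor
        · exact fun h => h.trans (List.sublist_cons_self x xs).subperm
        · intro h
          rw [List.subperm_ext_iff] at h ⊢
          intro y hy
          have hxy : x < y := by
            rcases List.mem_cons.mp hy with rfl | hy'
            · exact hlt
            · exact lt_of_lt_of_le hlt (hcall y hy')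
          have := h y hy
          rwa [List.count_cons_of_ne (fun e => absurd e.symm hxy.ne')] at this
      · by_cases heq : x = c
        · subst heq
          simp only [scanB, if_neg hlt, if_true]
          rw [ih cs hxs hcs]
          exact (List.subperm_cons x).symm
        · have hcx : c < x := lt_of_le_of_ne (not_lt.mp hlt) (fun e => heq e.symm)
          simp only [scanB, if_neg hlt, if_neg heq, Bool.false_eq_true, false_iff]
          intro h
          rw [List.subperm_ext_iff] at h
          have := h c (by simp)
          have hnot : c ∉ x :: xs := by
            intro hm
            rcases List.mem_cons.mp hm with rfl | hm'
            · exact absurd rfl hcx.ne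
            · exact absurd (lt_of_lt_of_le hcx (hxall c hm')).ne' (by simp)
          rw [List.count_eq_zero_of_not_mem hnot] at this
          simp [List.count_cons_self] at this

-- closed form of B: str2's multiset is contained in str1's
lemma alt_eq (str1 str2 : String) :
    solution_alt str1 str2
      = decide (∀ c ∈ str2.toList, str2.toList.count c ≤ str1.toList.count c) := by
  unfold solution_alt
  have hp1 := PySem.List.sorted_pairwise str1.toList (fun x : Char => x)
  have hp2 := PySem.List.sorted_pairwise str2.toList (fun x : Char => x)
  have h := scanB_iff (PySem.List.sorted str1.toList (fun x => x) false)
      (PySem.List.sorted str2.toList (fun x => x) false) hp1 hp2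
  rw [Bool.eq_iff_iff, h, List.subperm_ext_iff, decide_eq_true_eq]
  have e1 := PySem.List.sorted_perm str1.toList (fun x : Char => x) false
  have e2 := PySem.List.sorted_perm str2.toList (fun x : Char => x) false
  constructor
  · intro h' c hc
    have := h' c ((e2.mem_iff).mpr hc)
    rwa [e1.count_eq, e2.count_eq] at this
  · intro h' c hc
    rw [e1.count_eq, e2.count_eq]
    exact h' c ((e2.mem_iff).mp hc)

-- ===== VERDICT (by name: the statement is the Claim_ definition above) =====
theorem solution_spec : Claim_equal_solution := by
  intro str1 str2 _
  unfold Spec_solution solution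
  rw [buildA_eq, go_eq, alt_eq]
  simp only [decide_eq_decide]
  constructor
  · intro h c hc
    have := (h c hc).2
    rw [PySem.Dict.getD_counter] at this
    exact_mod_cast this
  · intro h c hc
    refine ⟨?_, ?_⟩
    · rw [PySem.Dict.contains_counter]
      have h2 : 0 < str2.toList.count c := List.count_pos_iff.mpr hc
      have := h c hc
      have h1 : 0 < str1.toList.count c := by omega
      simpa using List.count_pos_iff.mp h1
    · rw [PySem.Dict.getD_counter]
      exact_mod_cast h c hc
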